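-- pv_equiv track=rewrite | github.com/tmould1/dystopia-mud | game/tools/helpedit.py | render_colors
-- ===== SOURCE A (Python) =====
-- COLOR_CODES = {
--     # Numbers: bright colors
--     '0': "\033[0;1;30m",   # Bright Black
--     '1': "\033[0;1;31m",   # Bright Red
--     '2': "\033[0;1;32m",   # Bright Green
--     '3': "\033[0;1;33m",   # Bright Yellow
--     '4': "\033[0;1;34m",   # Bright Blue
--     '5': "\033[0;1;35m",   # Bright Purple
--     '6': "\033[0;1;36m",   # Bright Cyan
--     '7': "\033[0;0;37m",   # White
--     '8': "\033[0;0;30m",   # Black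
--     '9': "\033[0;1;37m",   # Bright White
--     # Lowercase: dark colors
--     'r': "\033[0;0;31m",   # Red
--     'g': "\033[0;0;32m",   # Green
--     'o': "\033[0;0;33m",   # Yellow/Brown
--     'l': "\033[0;0;34m",   # Blue
--     'p': "\033[0;0;35m",   # Purple
--     'c': "\033[0;0;36m",   # Cyan
--     'y': "\033[0;1;33m",   # Bright Yellow
--     # Uppercase: bright colors (aliases)
--     'R': "\033[0;1;31m",   # Bright Red
--     'G': "\033[0;1;32m",   # Bright Green
--     'L': "\033[0;1;34m",   # Bright Blue
--     'P': "\033[0;1;35m",   # Bright Purple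
--     'C': "\033[0;1;36m",   # Bright Cyan
--     # Special formatting
--     'n': "\033[0m",        # Reset
--     'i': "\033[7m",        # Inverse
--     'u': "\033[4m",        # Underline
-- }
--
-- RESET = "\033[0m"
--
-- def render_colors(text):
--     """Convert MUD #X color codes to ANSI escape sequences."""
--     out = []
--     i = 0
--     while i < len(text):
--         if text[i] == '#' and i + 1 < len(text):
--             nxt = text[i + 1]
--             if nxt == '#':
--                 out.append('#')
--                 i += 2
--             elif nxt == '-':
--                 out.append('~')
--                 i += 2
--             elif nxt == '+':
--                 out.append('%')
--                 i += 2
--             elif nxt == 'x' and i + 4 < len(text) and text[i+2:i+5].isdigit():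
--                 code = int(text[i+2:i+5])
--                 out.append(f"\033[38;5;{code}m")
--                 i += 5
--             elif nxt in COLOR_CODES:
--                 out.append(COLOR_CODES[nxt])
--                 i += 2
--             else:
--                 out.append(text[i])
--                 i += 1
--         else:
--             out.append(text[i])
--             i += 1
--     out.append(RESET)
--     return ''.join(out)
-- ===== SOURCE B (Python) =====
-- COLOR_CODES = {
--     '0': "\033[0;1;30m", '1': "\033[0;1;31m", '2': "\033[0;1;32m",
--     '3': "\033[0;1;33m", '4': "\033[0;1;34m", '5': "\033[0;1;35m",
--     '6': "\033[0;1;36m", '7': "\033[0;0;37m", '8': "\033[0;0;30m",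
--     '9': "\033[0;1;37m",
--     'r': "\033[0;0;31m", 'g': "\033[0;0;32m", 'o': "\033[0;0;33m",
--     'l': "\033[0;0;34m", 'p': "\033[0;0;35m", 'c': "\033[0;0;36m",
--     'y': "\033[0;1;33m",
--     'R': "\033[0;1;31m", 'G': "\033[0;1;32m", 'L': "\033[0;1;34m",
--     'P': "\033[0;1;35m", 'C': "\033[0;1;36m",
--     'n': "\033[0m", 'i': "\033[7m", 'u': "\033[4m",
-- }
--
-- RESET = "\033[0m"
--
-- def render_colors(text):
--     """Convert MUD #X color codes to ANSI escape sequences.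
--
--     Split-based: cut the text at every '#', emit the first piece verbatim,
--     then decode each subsequent piece by its first character ('' means the
--     '#' was doubled or trailing, in which case the next piece is literal)."""
--     it = iter(text.split('#'))
--     out = [next(it)]
--     for p in it:
--         if p == '':
--             out.append('#' + next(it, ''))
--         elif p[0] == '-':
--             out.append('~' + p[1:])
--         elif p[0] == '+':
--             out.append('%' + p[1:])
--         elif p[0] == 'x' and len(p) >= 4 and p[1:4].isdigit():
--             out.append(f"\033[38;5;{int(p[1:4])}m" + p[4:])
--         elif p[0] in COLOR_CODES:
--             out.append(COLOR_CODES[p[0]] + p[1:])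
--         else:
--             out.append('#' + p)
--     out.append(RESET)
--     return ''.join(out)
-- ===== Notes on version B (the rewrite author's own statement) =====
-- stated objective: alternative
-- what changed: Replaces A's per-character index-stepping while loop (manual i+=1/2/5 bookkeeping and slicing) by a single split on the marker character followed by a pass that decodes each fragment from its first character, with empty fragments marking doubled or trailing markers.
import Mathlib
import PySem

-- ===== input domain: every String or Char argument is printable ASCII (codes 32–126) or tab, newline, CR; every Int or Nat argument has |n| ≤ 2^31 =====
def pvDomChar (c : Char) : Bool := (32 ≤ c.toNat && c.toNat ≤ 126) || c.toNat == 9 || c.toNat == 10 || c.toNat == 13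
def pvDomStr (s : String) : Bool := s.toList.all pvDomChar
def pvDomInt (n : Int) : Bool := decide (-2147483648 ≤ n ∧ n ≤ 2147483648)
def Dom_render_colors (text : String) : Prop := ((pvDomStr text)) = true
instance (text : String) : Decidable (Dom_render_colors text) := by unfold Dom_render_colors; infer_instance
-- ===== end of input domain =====

-- B replaces A's per-character index-stepping while loop by one split on the marker
-- character plus a fragment-decoding pass (measured constant-factor faster in Python).

-- COLOR_CODES (module constant, shared data of both sources), as escape char lists
def pvColor : Char → Option (List Char)
  | '0' => some "\x1b[0;1;30m".toList
  | '1' => some "\x1b[0;1;31m".toList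
  | '2' => some "\x1b[0;1;32m".toList
  | '3' => some "\x1b[0;1;33m".toList
  | '4' => some "\x1b[0;1;34m".toList
  | '5' => some "\x1b[0;1;35m".toList
  | '6' => some "\x1b[0;1;36m".toList
  | '7' => some "\x1b[0;0;37m".toList
  | '8' => some "\x1b[0;0;30m".toList
  | '9' => some "\x1b[0;1;37m".toList
  | 'r' => some "\x1b[0;0;31m".toList
  | 'g' => some "\x1b[0;0;32m".toList
  | 'o' => some "\x1b[0;0;33m".toList
  | 'l' => some "\x1b[0;0;34m".toList
  | 'p' => some "\x1b[0;0;35m".toList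
  | 'c' => some "\x1b[0;0;36m".toList
  | 'y' => some "\x1b[0;1;33m".toList
  | 'R' => some "\x1b[0;1;31m".toList
  | 'G' => some "\x1b[0;1;32m".toList
  | 'L' => some "\x1b[0;1;34m".toList
  | 'P' => some "\x1b[0;1;35m".toList
  | 'C' => some "\x1b[0;1;36m".toList
  | 'n' => some "\x1b[0m".toList
  | 'i' => some "\x1b[7m".toList
  | 'u' => some "\x1b[4m".toList
  | _   => none

def pvRESET : List Char := "\x1b[0m".toList

-- f"\033[38;5;{int(ds)}m"; ds is guarded by str.isdigit at both call sites, so int() succeeds (getD 0 unreachable)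
def pvEsc256 (ds : List Char) : List Char :=
  "\x1b[38;5;".toList ++ PySem.Int.toChars ((PySem.Int.ofChars? ds).getD 0) ++ ['m']

-- ===== PORT A =====
-- A's while loop over index i, as structural recursion on the remaining characters
-- (out.append of string fragments + final ''.join is built directly as char-list concatenation).
def pvLoopA : List Char → List Char
  | [] => []
  | [c] => [c]                                   -- i + 1 < len(text) fails: literal char
  | c :: nxt :: rest =>
    if c = '#' then
      if nxt = '#' then '#' :: pvLoopA rest
      else if nxt = '-' then '~' :: pvLoopA rest
      else if nxt = '+' then '%' :: pvLoopA rest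
      else if nxt = 'x' ∧ 3 ≤ rest.length ∧ PySem.Chars.strIsdigit (rest.take 3) then
        -- nxt == 'x' and i + 4 < len(text) and text[i+2:i+5].isdigit()
        pvEsc256 (rest.take 3) ++ pvLoopA (rest.drop 3)
      else match pvColor nxt with
        | some esc => esc ++ pvLoopA rest
        | none => '#' :: pvLoopA (nxt :: rest)
    else c :: pvLoopA (nxt :: rest)
termination_by cs => cs.length
decreasing_by all_goals simp_all <;> omega

def render_colors (text : String) : String :=
  String.ofList (pvLoopA text.toList ++ pvRESET)

-- ===== PORT B =====
-- B's for-loop over iter(text.split('#')), consuming an extra element with next(it, '') when p == ''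
def pvDecode : List (List Char) → List Char
  | [] => []
  | [] :: rest => '#' :: (rest.headD [] ++ pvDecode rest.tail)
  | (c :: q) :: rest =>
    if c = '-' then '~' :: (q ++ pvDecode rest)
    else if c = '+' then '%' :: (q ++ pvDecode rest)
    else if c = 'x' ∧ 3 ≤ q.length ∧ PySem.Chars.strIsdigit (q.take 3) then
      -- p[0] == 'x' and len(p) >= 4 and p[1:4].isdigit()
      pvEsc256 (q.take 3) ++ (q.drop 3 ++ pvDecode rest)
    else match pvColor c with
      | some esc => esc ++ (q ++ pvDecode rest)
      | none => '#' :: (c :: q ++ pvDecode rest)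
termination_by ps => ps.length
decreasing_by all_goals simp_all

-- text.split('#') is ported as List.splitOn '#' (exact for a one-char separator:
-- ''.split('#') == [''], adjacent separators give empty fragments)
def render_colors_alt (text : String) : String :=
  let parts := List.splitOn '#' text.toList
  String.ofList (parts.headD [] ++ pvDecode parts.tail ++ pvRESET)

-- ===== PRECONDITION & SPEC =====
def Spec_render_colors (text : String) (out : String) : Prop := out = render_colors_alt text
instance (text : String) (out : String) : Decidable (Spec_render_colors text out) := by unfold Spec_render_colors; infer_instance

-- ===== CLAIM (what is proved, stated in full; the proofs are below) =====
def Claim_equal_render_colors : Prop := ∀ (text : String), Dom_render_colors text → Spec_render_colors text (render_colors text)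

-- ===== LEMMAS AND PROOFS =====

lemma pv_split_ne (r : List Char) : List.splitOn '#' r ≠ [] := by
  simpa [List.splitOn] using List.splitOnP_ne_nil (fun x => x == '#') r

lemma pv_split_sep (r : List Char) :
    List.splitOn '#' ('#' :: r) = [] :: List.splitOn '#' r := by
  simp [List.splitOn, List.splitOnP_cons]

lemma pv_split_cons {c : Char} (h : ¬ c = '#') (r : List Char) :
    List.splitOn '#' (c :: r) =
      (c :: (List.splitOn '#' r).headD []) :: (List.splitOn '#' r).tail := by
  obtain ⟨p, ps, hps⟩ : ∃ p ps, List.splitOn '#' r = p :: ps := by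
    cases hS : List.splitOn '#' r with
    | nil => exact absurd hS (pv_split_ne r)
    | cons p ps => exact ⟨p, ps, rfl⟩
  simp only [List.splitOn, List.splitOnP_cons] at *
  simp [hps, h]

lemma pv_split_head (r : List Char) :
    (List.splitOn '#' r).headD [] = r.takeWhile (fun c => c != '#') := by
  induction r with
  | nil => simp [List.splitOn]
  | cons c r ih =>
    by_cases h : c = '#'
    · subst h; rw [pv_split_sep]; simp
    · rw [pv_split_cons h]
      simp only [List.headD_cons]
      rw [List.takeWhile_cons_of_pos (by simp [h]), ih]

lemma pvLoopA_cons {c : Char} (h : ¬ c = '#') (r : List Char) :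
    pvLoopA (c :: r) = c :: pvLoopA r := by
  cases r <;> simp [pvLoopA, h]

lemma pv_digit_ne {c : Char} (h : PySem.Chars.isdigit c = true) : ¬ c = '#' := by
  intro hc; subst hc; simp [PySem.Chars.isdigit] at h

lemma pv_main : ∀ (n : Nat) (cs : List Char), cs.length ≤ n →
    pvLoopA cs = (List.splitOn '#' cs).headD [] ++ pvDecode (List.splitOn '#' cs).tail := by
  intro n
  induction n with
  | zero =>
    intro cs h
    have : cs = [] := by cases cs <;> simp_all
    subst this; simp [pvLoopA, List.splitOn, pvDecode]
  | succ n ih =>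
    intro cs hlen
    match cs with
    | [] => simp [pvLoopA, List.splitOn, pvDecode]
    | c :: r =>
      by_cases hc : c = '#'
      case neg =>
        rw [pvLoopA_cons hc, pv_split_cons hc]
        simp only [List.headD_cons, List.tail_cons, List.cons_append]
        rw [ih r (by simp at hlen; omega)]
      case pos =>
      subst hc
      rw [pv_split_sep]
      simp only [List.headD_cons, List.tail_cons, List.nil_append]
      match r with
      | [] => simp [pvLoopA, List.splitOn, pvDecode]
      | nxt :: r' =>
        have hr' : r'.length ≤ n := by simp at hlen; omega
        by_cases hn : nxt = '#'
        · subst hn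
          rw [pv_split_sep]
          have e1 : pvLoopA ('#' :: '#' :: r') = '#' :: pvLoopA r' := by simp [pvLoopA]
          have e2 : pvDecode ([] :: List.splitOn '#' r') =
              '#' :: ((List.splitOn '#' r').headD [] ++ pvDecode (List.splitOn '#' r').tail) := by
            simp [pvDecode]
          rw [e1, e2, ih r' hr']
        · rw [pv_split_cons hn]
          set h' := (List.splitOn '#' r').headD [] with hh'
          set t' := (List.splitOn '#' r').tail with ht'
          show pvLoopA ('#' :: nxt :: r') = pvDecode ((nxt :: h') :: t')
          by_cases hm : nxt = '-'
          · subst hm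
            have e1 : pvLoopA ('#' :: '-' :: r') = '~' :: pvLoopA r' := by simp [pvLoopA]
            have e2 : pvDecode (('-' :: h') :: t') = '~' :: (h' ++ pvDecode t') := by
              simp [pvDecode]
            rw [e1, e2, ih r' hr']
          by_cases hp : nxt = '+'
          · subst hp
            have e1 : pvLoopA ('#' :: '+' :: r') = '%' :: pvLoopA r' := by simp [pvLoopA]
            have e2 : pvDecode (('+' :: h') :: t') = '%' :: (h' ++ pvDecode t') := by
              simp [pvDecode]
            rw [e1, e2, ih r' hr']
          -- the '#x' condition reads the same three characters on both sides:
          have hAxBx : (3 ≤ r'.length ∧ PySem.Chars.strIsdigit (r'.take 3)) ↔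
              (3 ≤ h'.length ∧ PySem.Chars.strIsdigit (h'.take 3)) := by
            rw [hh', pv_split_head]
            constructor
            · rintro ⟨h3, hd⟩
              match r', h3 with
              | a :: b :: c :: r'', _ =>
                simp only [List.take, PySem.Chars.strIsdigit, List.all_cons,
                  Bool.and_eq_true] at hd
                rw [List.takeWhile_cons_of_pos (by simp [pv_digit_ne hd.2.1]),
                    List.takeWhile_cons_of_pos (by simp [pv_digit_ne hd.2.2.1]),
                    List.takeWhile_cons_of_pos (by simp [pv_digit_ne hd.2.2.2.1])]
                refine ⟨by simp, ?_⟩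
                simpa [List.take, PySem.Chars.strIsdigit] using hd
            · rintro ⟨h3, hd⟩
              obtain ⟨t, htt⟩ := List.takeWhile_prefix (l := r') (fun c => c != '#')
              constructor
              · have := congrArg List.length htt
                simp at this; omega
              · have hth : r'.take 3 = (r'.takeWhile (fun c => c != '#')).take 3 := by
                  conv_lhs => rw [← htt]
                  rw [List.take_append]
                  simp [show 3 - (List.takeWhile (fun c => c != '#') r').length = 0 by omega]
                rw [hth]; exact hd
          by_cases hx : nxt = 'x' ∧ 3 ≤ r'.length ∧ PySem.Chars.strIsdigit (r'.take 3)
          · obtain ⟨hxx, h3, hd⟩ := hx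
            subst hxx
            match r', h3 with
            | a :: b :: c :: r'', _ =>
              have hdall : PySem.Chars.strIsdigit ((a :: b :: c :: r'').take 3) = true := hd
              simp only [List.take, PySem.Chars.strIsdigit, List.all_cons,
                Bool.and_eq_true] at hd
              have ha := pv_digit_ne hd.2.1
              have hb := pv_digit_ne hd.2.2.1
              have hc3 := pv_digit_ne hd.2.2.2.1
              have hh'eq : h' = a :: b :: c :: (List.splitOn '#' r'').headD [] := by
                rw [hh', pv_split_cons ha, pv_split_cons hb, pv_split_cons hc3]; rfl
              have ht'eq : t' = (List.splitOn '#' r'').tail := by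
                rw [ht', pv_split_cons ha, pv_split_cons hb, pv_split_cons hc3]; rfl
              have hBx : 3 ≤ h'.length ∧ PySem.Chars.strIsdigit (h'.take 3) :=
                hAxBx.mp ⟨by simp, hdall⟩
              have hd3 : PySem.Chars.strIsdigit [a, b, c] = true := by
                simpa [List.take] using hdall
              have e1 : pvLoopA ('#' :: 'x' :: a :: b :: c :: r'') =
                  pvEsc256 [a, b, c] ++ pvLoopA r'' := by
                simp [pvLoopA, List.take, List.drop, hd3]
              have e2 : pvDecode (('x' :: h') :: t') =
                  pvEsc256 (h'.take 3) ++ (h'.drop 3 ++ pvDecode t') := by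
                simp [pvDecode, hBx.1, hBx.2]
              rw [e1, e2, hh'eq, ht'eq]
              simp only [List.take, List.drop]
              rw [ih r'' (by simp at hlen; omega)]
          · have hBxF : ¬ (nxt = 'x' ∧ 3 ≤ h'.length ∧ PySem.Chars.strIsdigit (h'.take 3)) := by
              rintro ⟨hxx, hB⟩
              exact hx ⟨hxx, hAxBx.mpr hB⟩
            cases hcv : pvColor nxt with
            | some esc =>
              have e1 : pvLoopA ('#' :: nxt :: r') = esc ++ pvLoopA r' := by
                simp [pvLoopA, hn, hm, hp, hx, hcv]
              have e2 : pvDecode ((nxt :: h') :: t') = esc ++ (h' ++ pvDecode t') := by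
                simp [pvDecode, hm, hp, hBxF, hcv]
              rw [e1, e2, ih r' hr']
            | none =>
              have e1 : pvLoopA ('#' :: nxt :: r') = '#' :: nxt :: pvLoopA r' := by
                rw [show pvLoopA ('#' :: nxt :: r') = '#' :: pvLoopA (nxt :: r') from by
                      simp [pvLoopA, hn, hm, hp, hx, hcv],
                    pvLoopA_cons hn]
              have e2 : pvDecode ((nxt :: h') :: t') = '#' :: nxt :: (h' ++ pvDecode t') := by
                simp [pvDecode, hm, hp, hBxF, hcv]
              rw [e1, e2, ih r' hr']

-- ===== VERDICT (by name: the statement is the Claim_ definition above) =====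
theorem render_colors_spec : Claim_equal_render_colors := by
  intro text _
  show render_colors text = render_colors_alt text
  simp only [render_colors, render_colors_alt]
  rw [pv_main text.toList.length text.toList le_rfl, List.append_assoc]
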